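-- pv_equiv track=rewrite | github.com/rajlath/rkl_codes | TopCoder/TCO19_SRM_751_1_2_CalkinWilf.py | findRational
-- ===== SOURCE A (Python) =====
-- def findRational(st):
--     a, b = 1, 1
--     for i in st:
--         if i == "R":
--             a, b = a + b, b
--         else:
--             a, b = a, a + b
--     return (a, b)
-- ===== SOURCE B (Python) =====
-- def findRational(st):
--     a, b = 1, 1
--     i, n = 0, len(st)
--     while i < n:
--         j = i
--         while j < n and st[j] == st[i]:
--             j += 1
--         k = j - i
--         if st[i] == "R":
--             a += k * b
--         else:
--             b += k * a
--         i = j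
--     return (a, b)
-- ===== Notes on version B (the rewrite author's own statement) =====
-- stated objective: alternative
-- what changed: B scans maximal runs of identical characters and applies each run as one multiply-add (a += k*b or b += k*a) instead of A's per-character additions.
import Mathlib
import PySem

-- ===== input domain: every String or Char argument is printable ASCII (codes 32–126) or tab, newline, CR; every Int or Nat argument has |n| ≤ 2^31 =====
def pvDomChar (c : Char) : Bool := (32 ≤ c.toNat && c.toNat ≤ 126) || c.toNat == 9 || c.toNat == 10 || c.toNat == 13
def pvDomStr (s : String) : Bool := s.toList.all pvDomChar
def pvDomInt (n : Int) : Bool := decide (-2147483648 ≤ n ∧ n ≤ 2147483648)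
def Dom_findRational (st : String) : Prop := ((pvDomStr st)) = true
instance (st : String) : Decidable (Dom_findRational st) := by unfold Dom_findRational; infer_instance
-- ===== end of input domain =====

-- B replaces A's per-character loop by a run-length scan: each maximal run of k
-- identical characters becomes one multiply-add. Alternative decomposition, same cost.

-- ===== PORT A =====
-- one step of A's loop body
def pvStepA (p : Int × Int) (c : Char) : Int × Int :=
  if c == 'R' then (p.1 + p.2, p.2) else (p.1, p.1 + p.2)

def findRational (st : String) : Int × Int :=
  st.toList.foldl pvStepA (1, 1)

-- ===== PORT B =====
-- B's outer while-loop: take the maximal run starting at the current position,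
-- apply it as a single multiply-add, continue after the run.
def pvRunsB (a b : Int) : List Char → Int × Int
  | [] => (a, b)
  | c :: rest =>
    let k : Int := (rest.takeWhile (· == c)).length + 1
    let rest' := rest.dropWhile (· == c)
    if c == 'R' then pvRunsB (a + k * b) b rest' else pvRunsB a (b + k * a) rest'
termination_by l => l.length
decreasing_by
  all_goals exact Nat.lt_succ_of_le (List.length_dropWhile_le _ _)

def findRational_alt (st : String) : Int × Int :=
  pvRunsB 1 1 st.toList

-- ===== PRECONDITION & SPEC =====
def Spec_findRational (st : String) (out : Int × Int) : Prop := out = findRational_alt st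
instance (st : String) (out : Int × Int) : Decidable (Spec_findRational st out) := by unfold Spec_findRational; infer_instance

-- ===== CLAIM (what is proved, stated in full; the proofs are below) =====
def Claim_equal_findRational : Prop := ∀ (st : String), Dom_findRational st → Spec_findRational st (findRational st)

-- ===== LEMMAS AND PROOFS =====

-- k steps of A over a constant run of character c equal one multiply-add
theorem pv_foldl_const_run (c : Char) (l : List Char) (h : ∀ x ∈ l, x = c)
    (a b : Int) :
    l.foldl pvStepA (a, b)
      = if c == 'R' then (a + (l.length : Int) * b, b)
        else (a, b + (l.length : Int) * a) := by
  induction l generalizing a b with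
  | nil => simp
  | cons x xs ih =>
    have hx : x = c := h x (by simp)
    have hxs : ∀ y ∈ xs, y = c := fun y hy => h y (by simp [hy])
    subst hx
    by_cases hc : x == 'R'
    · simp only [List.foldl_cons, pvStepA, hc, if_true, ih hxs, List.length_cons]
      push_cast
      simp only [Prod.mk.injEq]
      constructor <;> first | trivial | ring
    · simp only [List.foldl_cons, pvStepA, hc, ih hxs, List.length_cons]
      push_cast
      simp only [Prod.mk.injEq]
      constructor <;> first | trivial | ring

-- folding A's step over the whole string equals B's run-by-run loop
theorem pv_foldl_eq_runs (a b : Int) (l : List Char) :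
    l.foldl pvStepA (a, b) = pvRunsB a b l := by
  induction a, b, l using pvRunsB.induct with
  | case1 a b => simp [pvRunsB]
  | case2 a b c rest k rest' hR ih =>
    rw [pvRunsB]
    have hall : ∀ x ∈ c :: rest.takeWhile (· == c), x = c := by
      intro x hx
      rcases List.mem_cons.mp hx with h | h
      · exact h
      · have hp : (x == c) = true := List.mem_takeWhile_imp (p := (· == c)) h
        exact eq_of_beq hp
    have hsplit : c :: rest = (c :: rest.takeWhile (· == c)) ++ rest.dropWhile (· == c) := by
      simp [List.takeWhile_append_dropWhile]
    rw [hsplit, List.foldl_append, pv_foldl_const_run c _ hall a b]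
    simp only [hR, if_true, List.length_cons]
    rw [show (((rest.takeWhile (· == c)).length : Nat) : Int) + 1
        = ((rest.takeWhile (· == c)).length + 1 : Int) from by norm_cast] at *
    exact ih
  | case3 a b c rest k rest' hR ih =>
    rw [pvRunsB]
    have hall : ∀ x ∈ c :: rest.takeWhile (· == c), x = c := by
      intro x hx
      rcases List.mem_cons.mp hx with h | h
      · exact h
      · have hp : (x == c) = true := List.mem_takeWhile_imp (p := (· == c)) h
        exact eq_of_beq hp
    have hsplit : c :: rest = (c :: rest.takeWhile (· == c)) ++ rest.dropWhile (· == c) := by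
      simp [List.takeWhile_append_dropWhile]
    rw [hsplit, List.foldl_append, pv_foldl_const_run c _ hall a b]
    simp only [hR, List.length_cons]
    rw [show (((rest.takeWhile (· == c)).length : Nat) : Int) + 1
        = ((rest.takeWhile (· == c)).length + 1 : Int) from by norm_cast] at *
    exact ih

-- ===== VERDICT (by name: the statement is the Claim_ definition above) =====
theorem findRational_spec : Claim_equal_findRational := by
  intro st _
  unfold Spec_findRational findRational findRational_alt
  exact pv_foldl_eq_runs 1 1 _
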